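-- pv_equiv track=rewrite | github.com/OCHO-Systems/KnobKraft-orm | adaptions/DSI Prophet 12.py | nameFromDump
-- ===== SOURCE A (Python) =====
-- prophet12_ID = 0b00101010  # See Page 82 of the prophet 12 manual
--
-- def isEditBufferDump(message):
--     return (len(message) > 3
--             and message[0] == 0xf0
--             and message[1] == 0x01  # Sequential
--             and message[2] == prophet12_ID
--             and message[3] == 0b00000011  # Edit Buffer Data
--             )
--
-- def isSingleProgramDump(message):
--     return (len(message) > 3
--             and message[0] == 0xf0
--             and message[1] == 0x01  # Sequential
--             and message[2] == prophet12_ID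
--             and message[3] == 0b00000010  # Program Data
--             )
--
-- def nameFromDump(message):
--     dataBlock = []
--     if isSingleProgramDump(message):
--         dataBlock = message[6:-1]
--     elif isEditBufferDump(message):
--         dataBlock = message[4:-1]
--     if len(dataBlock) > 0:
--         patchData = unescapeSysex(dataBlock)
--         layer_a_name = ''.join([chr(x) for x in patchData[914-512:931-512]]).strip() # each layer needs 512 bytes
--         return layer_a_name
--         # layer_b_name = ''.join([chr(x) for x in patchData[914:931]]).strip()  # This is layer B name found first
--         # return layer_a_name if layer_a_name == layer_b_name else layer_a_name + "|" + layer_b_name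
--     return "Invalid"
--
-- def unescapeSysex(sysex):
--     result = []
--     dataIndex = 0
--     while dataIndex < len(sysex):
--         msbits = sysex[dataIndex]
--         dataIndex += 1
--         for i in range(7):
--             if dataIndex < len(sysex):
--                 result.append(sysex[dataIndex] | ((msbits & (1 << i)) << (7 - i)))
--             dataIndex += 1
--     return result
-- ===== SOURCE B (Python) =====
-- prophet12_ID = 0b00101010
--
--
-- def isEditBufferDump(message):
--     return (len(message) > 3
--             and message[0] == 0xf0
--             and message[1] == 0x01
--             and message[2] == prophet12_ID
--             and message[3] == 0b00000011)
--
--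
-- def isSingleProgramDump(message):
--     return (len(message) > 3
--             and message[0] == 0xf0
--             and message[1] == 0x01
--             and message[2] == prophet12_ID
--             and message[3] == 0b00000010)
--
--
-- def nameFromDump(message):
--     # Decode only the 17 layer-A name bytes (unescaped indices 402..418) by
--     # closed-form index arithmetic instead of unescaping the whole data block.
--     if isSingleProgramDump(message):
--         dataBlock = message[6:-1]
--     elif isEditBufferDump(message):
--         dataBlock = message[4:-1]
--     else:
--         return "Invalid"
--     if not dataBlock:
--         return "Invalid"
--     n = len(dataBlock)
--     chars = []
--     for j in range(402, 419):
--         g, i = divmod(j, 7)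
--         p = g * 8 + 1 + i
--         if p >= n:
--             break
--         chars.append(chr(dataBlock[p] | ((dataBlock[g * 8] & (1 << i)) << (7 - i))))
--     return ''.join(chars).strip()
-- ===== Notes on version B (the rewrite author's own statement) =====
-- stated objective: alternative
-- what changed: Instead of slicing out the data block and sequentially unescaping all of it before slicing out 17 name bytes, B computes each of the 17 layer-A name bytes directly from the message via closed-form index arithmetic (j//7, j%7) and stops at the first missing byte.
-- outside the precondition, e.g. on nameFromDump([240, 1, 42, 3, 300, 247]): A returns '', B returns ''
import Mathlib
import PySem

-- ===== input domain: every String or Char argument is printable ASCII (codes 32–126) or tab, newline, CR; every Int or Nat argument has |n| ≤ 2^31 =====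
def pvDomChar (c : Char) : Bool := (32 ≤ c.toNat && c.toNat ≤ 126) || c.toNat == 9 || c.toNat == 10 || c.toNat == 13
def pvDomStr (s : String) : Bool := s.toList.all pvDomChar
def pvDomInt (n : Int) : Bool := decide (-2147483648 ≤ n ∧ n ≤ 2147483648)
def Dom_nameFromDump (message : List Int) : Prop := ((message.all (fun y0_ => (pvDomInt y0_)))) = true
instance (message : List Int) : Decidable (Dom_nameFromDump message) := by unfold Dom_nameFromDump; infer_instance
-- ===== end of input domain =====

-- B decodes only the 17 layer-A name bytes straight from the message by closed-form index
-- arithmetic instead of unescaping the whole data block; return values proved equal on Pre_.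

-- ===== PORT A =====
def isEditBufferDumpL (m : List Int) : Bool :=
  decide (3 < m.length) && decide (m.getD 0 0 = 240) && decide (m.getD 1 0 = 1)
    && decide (m.getD 2 0 = 42) && decide (m.getD 3 0 = 3)

def isSingleProgramDumpL (m : List Int) : Bool :=
  decide (3 < m.length) && decide (m.getD 0 0 = 240) && decide (m.getD 1 0 = 1)
    && decide (m.getD 2 0 = 42) && decide (m.getD 3 0 = 2)

-- one step of the inner 'for i in range(7)' of unescapeSysex: state = (dataIndex, result)
def innerStep (sysex : List Int) (msbits : Int) (st : Nat × List Int) (i : Nat) : Nat × List Int :=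
  (st.1 + 1,
   if st.1 < sysex.length then
     st.2 ++ [PySem.Int.bor (sysex.getD st.1 0) ((PySem.Int.band msbits ((1 : Int) <<< i)) <<< (7 - i))]
   else st.2)

-- the inner loop advances dataIndex by the number of iterations (cited for termination)
theorem foldl_innerStep_fst (sysex : List Int) (m : Int) (l : List Nat) (st : Nat × List Int) :
    (l.foldl (innerStep sysex m) st).1 = st.1 + l.length := by
  induction l generalizing st with
  | nil => simp
  | cons a l ih => simp [List.foldl, ih, innerStep]; omega

-- the 'while dataIndex < len(sysex)' loop of unescapeSysex
def unescapeGo (sysex : List Int) (dataIndex : Nat) (acc : List Int) : List Int :=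
  if _h : dataIndex < sysex.length then
    let msbits := sysex.getD dataIndex 0
    let st := (List.range 7).foldl (innerStep sysex msbits) (dataIndex + 1, acc)
    unescapeGo sysex st.1 st.2
  else acc
termination_by sysex.length - dataIndex
decreasing_by
  rw [foldl_innerStep_fst]; simp; omega

def unescapeSysexL (sysex : List Int) : List Int := unescapeGo sysex 0 []

def nameFromDump (message : List Int) : String :=
  let dataBlock : List Int :=
    if isSingleProgramDumpL message then PySem.List.slice message (some 6) (some (-1))
    else if isEditBufferDumpL message then PySem.List.slice message (some 4) (some (-1))
    else []
  if 0 < dataBlock.length then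
    let patchData := unescapeSysexL dataBlock
    -- chr(x) ported as Char.ofNat x.toNat: exact for the byte values 0..255 Pre_ admits
    let nameChars := (PySem.List.slice patchData (some 402) (some 419)).map (fun x => Char.ofNat x.toNat)
    String.ofList (PySem.Chars.strip nameChars)
  else "Invalid"

-- ===== PORT B =====
-- decode the single unescaped name byte j straight from `message` at offset `off`
-- (chr ported as Char.ofNat _.toNat exactly as in port A)
def altByte (message : List Int) (off j : Nat) : Char :=
  Char.ofNat (PySem.Int.bor (message.getD (off + (j / 7 * 8 + 1 + j % 7)) 0)
    ((PySem.Int.band (message.getD (off + j / 7 * 8) 0) ((1 : Int) <<< (j % 7))) <<< (7 - j % 7))).toNat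

-- the 'for j in range(402, 419): … break' loop of Source B
def altLoop (message : List Int) (off n j : Nat) : List Char :=
  if _h : j < 419 then
    if j / 7 * 8 + 1 + j % 7 < n then
      altByte message off j :: altLoop message off n (j + 1)
    else []
  else []
termination_by 419 - j

def nameCore (message : List Int) (off : Nat) : String :=
  if message.length ≤ off + 1 then "Invalid"
  else String.ofList (PySem.Chars.strip (altLoop message off (message.length - 1 - off) 402))

def nameFromDump_alt (message : List Int) : String :=
  if isSingleProgramDumpL message then nameCore message 6
  else if isEditBufferDumpL message then nameCore message 4
  else "Invalid"

-- ===== PRECONDITION & SPEC =====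
-- Pre_ excludes messages that carry a valid dump header but contain ints outside the MIDI byte
-- range 0..255: on some of those A's chr() raises ValueError (decoded code point negative or
-- beyond the chr range); on the rest A still returns and Pre_ is slightly narrower than needed.
def Pre_nameFromDump (message : List Int) : Prop :=
  (3 < message.length ∧ message.getD 0 0 = 240 ∧ message.getD 1 0 = 1 ∧ message.getD 2 0 = 42
    ∧ (message.getD 3 0 = 2 ∨ message.getD 3 0 = 3)) → ∀ x ∈ message, 0 ≤ x ∧ x < 256
instance (message : List Int) : Decidable (Pre_nameFromDump message) := by
  unfold Pre_nameFromDump; infer_instance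

def pvWitness_nameFromDump : List Int := [240, 1, 42, 3, 0, 65, 247]

def Spec_nameFromDump (message : List Int) (out : String) : Prop := out = nameFromDump_alt message
instance (message : List Int) (out : String) : Decidable (Spec_nameFromDump message out) := by
  unfold Spec_nameFromDump; infer_instance

-- ===== CLAIM (what is proved, stated in full; the proofs are below) =====
def Claim_equal_nameFromDump : Prop := ∀ (message : List Int), Dom_nameFromDump message →
  Pre_nameFromDump message → Spec_nameFromDump message (nameFromDump message)

-- ===== LEMMAS AND PROOFS =====

-- proof-side vocabulary: the value of unescaped byte j, whether it exists, and how many exist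
def phi (sysex : List Int) (j : Nat) : Int :=
  PySem.Int.bor (sysex.getD (j / 7 * 8 + 1 + j % 7) 0)
    ((PySem.Int.band (sysex.getD (j / 7 * 8) 0) ((1 : Int) <<< (j % 7))) <<< (7 - j % 7))

def qd (n j : Nat) : Bool := decide (j / 7 * 8 + 1 + j % 7 < n)

def chunkOut (sysex : List Int) (k : Nat) : List Int :=
  ((List.range' (7 * k) 7).filter (qd sysex.length)).map (phi sysex)

def numChunks (n : Nat) : Nat := (n + 7) / 8

def nameLen (n : Nat) : Nat := (List.range (7 * numChunks n)).countP (qd n)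

theorem inner_go (sysex : List Int) (k : Nat) :
    ∀ (n i : Nat) (acc : List Int), i + n = 7 →
      (List.range' i n).foldl (innerStep sysex (sysex.getD (8 * k) 0)) (8 * k + 1 + i, acc)
        = (8 * k + 8, acc ++ ((List.range' (7 * k + i) n).filter (qd sysex.length)).map (phi sysex)) := by
  intro n
  induction n with
  | zero => intro i acc h; simp; omega
  | succ n ih =>
    intro i acc h
    have hi : i < 7 := by omega
    have hdiv : (7 * k + i) / 7 * 8 = 8 * k := by omega
    have hmod : (7 * k + i) % 7 = i := by omega
    rw [List.range'_succ, List.range'_succ, List.foldl_cons, List.filter_cons]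
    have hstep : innerStep sysex (sysex.getD (8 * k) 0) (8 * k + 1 + i, acc) i
        = (8 * k + 1 + (i + 1),
           if 8 * k + 1 + i < sysex.length then acc ++ [phi sysex (7 * k + i)] else acc) := by
      simp [innerStep, phi, hdiv, hmod, Nat.add_assoc]
    rw [hstep]
    by_cases hc : 8 * k + 1 + i < sysex.length
    · have hq : qd sysex.length (7 * k + i) = true := by
        simp [qd, hdiv, hmod]; omega
      rw [if_pos hc, hq, ih (i + 1) (acc ++ [phi sysex (7 * k + i)]) (by omega)]
      simp [Nat.add_assoc]
    · have hq : qd sysex.length (7 * k + i) = false := by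
        simp [qd, hdiv, hmod]; omega
      rw [if_neg hc, hq, ih (i + 1) acc (by omega)]
      simp [Nat.add_assoc]

theorem chunk_lemma (sysex : List Int) (k : Nat) (acc : List Int) :
    (List.range 7).foldl (innerStep sysex (sysex.getD (8 * k) 0)) (8 * k + 1, acc)
      = (8 * k + 8, acc ++ chunkOut sysex k) := by
  have := inner_go sysex k 7 0 acc (by omega)
  simpa [List.range_eq_range', chunkOut] using this

theorem go_lemma (sysex : List Int) :
    ∀ (m k : Nat) (acc : List Int), m = numChunks sysex.length - k →
      unescapeGo sysex (8 * k) acc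
        = acc ++ (List.range' k (numChunks sysex.length - k)).flatMap (chunkOut sysex) := by
  intro m
  induction m with
  | zero =>
    intro k acc h
    have hk : ¬ 8 * k < sysex.length := by
      simp [numChunks] at h ⊢; omega
    rw [unescapeGo, dif_neg hk]
    have : numChunks sysex.length - k = 0 := by omega
    simp [this]
  | succ m ih =>
    intro k acc h
    by_cases hk : 8 * k < sysex.length
    · rw [unescapeGo, dif_pos hk]
      simp only [chunk_lemma]
      have h8 : 8 * k + 8 = 8 * (k + 1) := by omega
      rw [h8, ih (k + 1) (acc ++ chunkOut sysex k) (by simp [numChunks] at h ⊢; omega)]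
      have hr : List.range' k (numChunks sysex.length - k)
          = k :: List.range' (k + 1) (numChunks sysex.length - (k + 1)) := by
        have hkN : k < numChunks sysex.length := by simp [numChunks]; omega
        rw [show numChunks sysex.length - k = (numChunks sysex.length - (k+1)) + 1 by omega,
          List.range'_succ]
      rw [hr]
      simp
    · rw [unescapeGo, dif_neg hk]
      have : numChunks sysex.length - k = 0 := by simp [numChunks]; omega
      simp [this]

theorem flat_lemma (sysex : List Int) :
    ∀ M : Nat, (List.range' 0 M).flatMap (chunkOut sysex)
      = ((List.range' 0 (7 * M)).filter (qd sysex.length)).map (phi sysex) := by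
  intro M
  induction M with
  | zero => simp
  | succ M ih =>
    have h1 : List.range' 0 (M + 1) = List.range' 0 M ++ [M] := by
      have := @List.range'_append 0 M 1 1
      simpa using this.symm
    have h2 : List.range' 0 (7 * (M + 1)) = List.range' 0 (7 * M) ++ List.range' (7 * M) 7 := by
      have := @List.range'_append 0 (7 * M) 7 1
      simpa [Nat.mul_add] using this.symm
    rw [h1, h2]
    simp [List.flatMap_append, ih, chunkOut]

theorem unescape_eq (sysex : List Int) :
    unescapeSysexL sysex
      = ((List.range (7 * numChunks sysex.length)).filter (qd sysex.length)).map (phi sysex) := by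
  have := go_lemma sysex (numChunks sysex.length) 0 [] (by omega)
  simpa [unescapeSysexL, List.range_eq_range', flat_lemma] using this

theorem filter_range_prefix (p : Nat → Bool) (hp : ∀ i j, i ≤ j → p j = true → p i = true) :
    ∀ n : Nat, (List.range n).filter p = List.range ((List.range n).countP p) := by
  intro n
  induction n with
  | zero => simp
  | succ n ih =>
    rw [List.range_succ, List.filter_append, List.countP_append, ih]
    by_cases hn : p n = true
    · have hall : ∀ a ∈ List.range n, p a = true := by
        intro a ha; exact hp a n (by simp at ha; omega) hn
      rw [List.filter_eq_self.mpr hall] at ih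
      have hcnt : (List.range n).countP p = n := by
        have := congrArg List.length ih
        simpa using this.symm
      simp [hn, hcnt, List.range_succ]
    · simp at hn
      simp [hn]

theorem qd_downward (n : Nat) : ∀ i j, i ≤ j → qd n j = true → qd n i = true := by
  intro i j hij hj
  simp [qd] at hj ⊢
  omega

theorem qd_iff (n j : Nat) : qd n j = true ↔ j < nameLen n := by
  have hfil := filter_range_prefix (qd n) (qd_downward n) (7 * numChunks n)
  constructor
  · intro hq
    have hjlt : j < 7 * numChunks n := by
      simp [qd] at hq; simp [numChunks]; omega
    have : j ∈ (List.range (7 * numChunks n)).filter (qd n) :=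
      List.mem_filter.mpr ⟨by simpa using hjlt, hq⟩
    rw [hfil] at this
    simpa [nameLen] using this
  · intro hj
    have : j ∈ List.range (nameLen n) := by simpa using hj
    unfold nameLen at this
    rw [← hfil] at this
    exact (List.mem_filter.mp this).2

-- xs[a:-1] is drop-then-dropLast
theorem slice_neg_one_eq (xs : List Int) (a : Nat) :
    PySem.List.slice xs (some (a : Int)) (some (-1)) = (xs.drop a).dropLast := by
  simp only [PySem.List.slice, PySem.List.clampIdx]
  norm_num
  have hnn : ¬ ((a : Int) < 0) := by omega
  simp only [if_neg hnn]
  rw [List.dropLast_eq_take]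
  by_cases hx : xs = []
  · simp [hx]
  · rw [if_neg hx]
    have hlen1 : ((xs.length : Int) + -1).toNat = xs.length - 1 := by
      have : xs.length ≠ 0 := fun h => hx (List.eq_nil_of_length_eq_zero h)
      omega
    rw [hlen1]
    by_cases ha : a ≤ xs.length
    · have hmin : min a xs.length = a := by omega
      rw [hmin]
      congr 1
      simp
      omega
    · have hmin : min a xs.length = xs.length := by omega
      have hd1 : xs.drop xs.length = [] := by simp
      have hd2 : xs.drop a = [] := List.drop_eq_nil_of_le (by omega)
      rw [hmin, hd1, hd2]
      simp

theorem take_range'_one (k s n : Nat) : (List.range' s n).take k = List.range' s (min k n) := by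
  rw [List.range'_eq_map_range, List.range'_eq_map_range, ← List.map_take, List.take_range]

theorem getD_bridge (message : List Int) (off p : Nat)
    (hp : p < ((message.drop off).dropLast).length) :
    ((message.drop off).dropLast).getD p 0 = message.getD (off + p) 0 := by
  have hlen : ((message.drop off).dropLast).length = (message.length - off) - 1 := by simp
  have hplt : off + p < message.length := by omega
  rw [List.getD_eq_getElem _ _ hp, List.getD_eq_getElem _ _ hplt]
  rw [List.getElem_dropLast, List.getElem_drop]

-- A's sliced-and-chr'd name characters, in closed form
theorem A_chars (sysex : List Int) :
    (PySem.List.slice (unescapeSysexL sysex) (some 402) (some 419)).map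
        (fun x => Char.ofNat x.toNat)
      = (List.range' 402 (min 17 (nameLen sysex.length - 402))).map
          (fun j => Char.ofNat (phi sysex j).toNat) := by
  have hfil := filter_range_prefix (qd sysex.length) (qd_downward sysex.length)
    (7 * numChunks sysex.length)
  have hU : unescapeSysexL sysex
      = (List.range (nameLen sysex.length)).map (phi sysex) := by
    rw [unescape_eq, hfil]; rfl
  have h402 : ((402 : Int)) = ((402 : Nat) : Int) := by norm_num
  have h419 : ((419 : Int)) = ((419 : Nat) : Int) := by norm_num
  rw [hU, h402, h419, PySem.List.slice_natCast]
  rw [← List.map_drop, ← List.map_take, List.range_eq_range', List.drop_range', take_range'_one]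
  rw [List.map_map]
  congr 2

theorem B_loop (message : List Int) (off : Nat) :
    ∀ (m j : Nat), m = 419 - j →
      altLoop message off ((message.drop off).dropLast).length j
        = (List.range' j (min 419 (nameLen ((message.drop off).dropLast).length) - j)).map
            (fun jj => Char.ofNat (phi ((message.drop off).dropLast) jj).toNat) := by
  intro m
  set sysex := (message.drop off).dropLast with hsx
  induction m with
  | zero =>
    intro j h
    rw [altLoop, dif_neg (by omega)]
    have : min 419 (nameLen sysex.length) - j = 0 := by
      have := Nat.min_le_left 419 (nameLen sysex.length); omega
    simp [this]
  | succ m ih =>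
    intro j h
    by_cases hj : j < 419
    · rw [altLoop, dif_pos hj]
      by_cases hq : j / 7 * 8 + 1 + j % 7 < sysex.length
      · have hqd : qd sysex.length j = true := by simp [qd]; omega
        have hjL : j < nameLen sysex.length := (qd_iff _ _).mp hqd
        have hr : min 419 (nameLen sysex.length) - j
            = (min 419 (nameLen sysex.length) - (j + 1)) + 1 := by omega
        rw [if_pos hq, hr, List.range'_succ, List.map_cons]
        have hb : altByte message off j = Char.ofNat (phi sysex j).toNat := by
          unfold altByte phi
          rw [hsx]
          rw [getD_bridge message off (j / 7 * 8 + 1 + j % 7) (by rw [← hsx]; omega),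
              getD_bridge message off (j / 7 * 8) (by rw [← hsx]; omega)]
        rw [hb, ih (j + 1) (by omega)]
      · have hqd : qd sysex.length j = false := by simp [qd]; omega
        have hjL : ¬ j < nameLen sysex.length := fun hc => by
          have := (qd_iff sysex.length j).mpr hc; simp [hqd] at this
        have : min 419 (nameLen sysex.length) - j = 0 := by
          have := Nat.min_le_right 419 (nameLen sysex.length); omega
        rw [if_neg hq, this]
        simp
    · rw [altLoop, dif_neg hj]
      have : min 419 (nameLen sysex.length) - j = 0 := by
        have := Nat.min_le_left 419 (nameLen sysex.length); omega
      simp [this]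

theorem core_eq (message : List Int) (off : Nat) :
    (if 0 < ((message.drop off).dropLast).length then
       String.ofList (PySem.Chars.strip
         ((PySem.List.slice (unescapeSysexL ((message.drop off).dropLast)) (some 402) (some 419)).map
           (fun x => Char.ofNat x.toNat)))
     else "Invalid")
      = nameCore message off := by
  unfold nameCore
  have hlen : ((message.drop off).dropLast).length = message.length - off - 1 := by simp
  by_cases hinv : message.length ≤ off + 1
  · rw [if_neg (by omega), if_pos hinv]
  · rw [if_pos (by omega), if_neg hinv]
    congr 1
    rw [A_chars]
    have hn : message.length - 1 - off = ((message.drop off).dropLast).length := by omega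
    rw [hn]
    have hB := B_loop message off 17 402 (by norm_num)
    rw [hB]
    have hmin : min 17 (nameLen ((List.drop off message).dropLast).length - 402)
        = min 419 (nameLen ((List.drop off message).dropLast).length) - 402 := by omega
    rw [hmin]

theorem main_eq (message : List Int) : nameFromDump message = nameFromDump_alt message := by
  unfold nameFromDump nameFromDump_alt
  have h6 : (6 : Int) = ((6 : Nat) : Int) := by norm_num
  have h4 : (4 : Int) = ((4 : Nat) : Int) := by norm_num
  by_cases h1 : isSingleProgramDumpL message
  · simp only [h1, if_pos]
    rw [h6, slice_neg_one_eq]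
    exact core_eq message 6
  · simp only [h1, Bool.false_eq_true, if_false]
    by_cases h2 : isEditBufferDumpL message
    · simp only [h2, if_pos]
      rw [h4, slice_neg_one_eq]
      exact core_eq message 4
    · simp [h2]

-- ===== VERDICT (by name: the statement is the Claim_ definition above) =====
theorem nameFromDump_spec : Claim_equal_nameFromDump := by
  intro message _ _
  unfold Spec_nameFromDump
  exact main_eq message
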